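-- pv_equiv track=rewrite | github.com/RuZhan2024/Final_Project | labels/make_urfd_labels.py | _gap_fill
-- ===== SOURCE A (Python) =====
-- from typing import Dict, List, Optional, Tuple
--
-- def _gap_fill(flags: List[bool], gap_fill: int) -> List[bool]:
--     """
--     Fill short False gaps inside True segments.
--
--     Example:
--       True True False True True  with gap_fill>=1 becomes all True.
--     """
--     if gap_fill <= 0 or not flags:
--         return flags
--     flags = flags[:]  # copy
--     i = 0
--     while i < len(flags):
--         if flags[i]:
--             i += 1
--             continue
--         j = i
--         while j < len(flags) and not flags[j]:
--             j += 1
--         gap = j - i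
--         if i > 0 and j < len(flags) and flags[i - 1] and flags[j] and gap <= gap_fill:
--             for t in range(i, j):
--                 flags[t] = True
--         i = j
--     return flags
-- ===== SOURCE B (Python) =====
-- def _gap_fill(flags, gap_fill):
--     if gap_fill <= 0 or not flags:
--         return flags
--     # run-length encode
--     runs = []
--     for b in flags:
--         if runs and runs[-1][0] == b:
--             runs[-1] = (b, runs[-1][1] + 1)
--         else:
--             runs.append((b, 1))
--     # re-emit runs; an interior False run is flipped to True when short enough
--     out = []
--     first = True
--     for v, n in runs[:-1]:
--         fill = (not v) and (not first) and n <= gap_fill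
--         out += [v or fill] * n
--         first = False
--     for v, n in runs[-1:]:
--         out += [v] * n
--     return out
-- ===== Notes on version B (the rewrite author's own statement) =====
-- stated objective: alternative
-- what changed: A walks the list with an index-based while loop, scanning each False run in place and mutating a copy; B run-length encodes the list in one pass and re-emits the runs, turning a False run True exactly when it is neither the first nor the last run and is short enough.
import Mathlib
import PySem

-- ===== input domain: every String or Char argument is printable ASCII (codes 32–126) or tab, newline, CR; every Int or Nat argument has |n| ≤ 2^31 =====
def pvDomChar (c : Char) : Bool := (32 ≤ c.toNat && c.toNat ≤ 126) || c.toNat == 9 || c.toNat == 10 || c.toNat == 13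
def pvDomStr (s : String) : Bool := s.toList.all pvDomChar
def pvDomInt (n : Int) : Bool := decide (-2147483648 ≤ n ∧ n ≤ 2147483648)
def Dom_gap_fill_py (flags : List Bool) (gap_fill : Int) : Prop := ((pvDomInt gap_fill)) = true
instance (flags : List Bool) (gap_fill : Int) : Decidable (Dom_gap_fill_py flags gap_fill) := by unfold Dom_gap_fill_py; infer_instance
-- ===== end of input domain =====

-- B replaces A's index-juggling while loop by run-length encoding the list and re-emitting
-- the runs, turning short interior False runs True (objective: alternative decomposition, same cost).

-- ===== PORT A =====
-- inner `while j < len(flags) and not flags[j]: j += 1`: first index ≥ j holding true (or length).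
-- flags[j] is guarded in range by `j < len(flags)`, so getD with any default is exact
def scanFalse (c : List Bool) (j : Nat) : Nat :=
  if j < c.length then
    if c.getD j false then j else scanFalse c (j + 1)
  else j
termination_by c.length - j

theorem scanFalse_ge (c : List Bool) (j : Nat) : j ≤ scanFalse c j := by
  rw [scanFalse]
  split
  · split
    · exact le_refl _
    · have := scanFalse_ge c (j + 1); omega
  · exact le_refl _
termination_by c.length - j

theorem scanFalse_gt (c : List Bool) (j : Nat) (hj : j < c.length) (hf : c.getD j false = false) :
    j < scanFalse c j := by
  rw [scanFalse]
  simp only [hj, if_pos, hf]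
  have := scanFalse_ge c (j + 1)
  simp only [Bool.false_eq_true, if_false]
  omega

-- `for t in range(i, j): flags[t] = True` (range(i,j) = List.range' i (j-i); all indices in range)
def fillTrue (c : List Bool) (i j : Nat) : List Bool :=
  (List.range' i (j - i)).foldl (fun c t => c.set t true) c

theorem fillTrue_length (c : List Bool) (i j : Nat) : (fillTrue c i j).length = c.length := by
  unfold fillTrue
  generalize List.range' i (j - i) = L
  induction L generalizing c with
  | nil => rfl
  | cons t L ih => simpa [List.foldl] using ih (c.set t true)

-- the outer `while i < len(flags)` loop of A; `c` is the (copied) mutable list, `i` the cursor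
def loopA (gf : Int) (c : List Bool) (i : Nat) : List Bool :=
  if hi : i < c.length then
    if hfi : c.getD i false then loopA gf c (i + 1)
    else
      let j := scanFalse c i
      let gap : Int := (j : Int) - (i : Int)
      -- flags[i-1] and flags[j] are guarded in range by `i > 0` / `j < len(flags)`; getD is exact there
      if 0 < i ∧ j < c.length ∧ c.getD (i - 1) false = true ∧ c.getD j false = true ∧ gap ≤ gf then
        loopA gf (fillTrue c i j) j
      else
        loopA gf c j
  else c
termination_by c.length - i
decreasing_by
  · omega
  · have h1 : i < scanFalse c i := scanFalse_gt c i hi (by simpa using hfi)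
    have h2 := fillTrue_length c i (scanFalse c i)
    omega
  · have h1 : i < scanFalse c i := scanFalse_gt c i hi (by simpa using hfi)
    omega

def gap_fill_py (flags : List Bool) (gap_fill : Int) : List Bool :=
  if gap_fill ≤ 0 ∨ flags = [] then flags
  else loopA gap_fill flags 0  -- flags[:] copies; the copy is value-identical

-- ===== PORT B =====
-- run-length encoding loop; Python appends/updates at the END of `runs`, so the accumulator
-- keeps the runs in reverse (current run at the head) and is reversed at the end
def rleStep (rs : List (Bool × Nat)) (b : Bool) : List (Bool × Nat) :=
  match rs with
  | (v, n) :: t => if v == b then (b, n + 1) :: t else (b, 1) :: (v, n) :: t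
  | [] => [(b, 1)]

def rleB (flags : List Bool) : List (Bool × Nat) :=
  (flags.foldl rleStep []).reverse

-- `for v, n in runs[:-1]: …` with state (out, first)
def decodeStep (gf : Int) (acc : List Bool × Bool) (r : Bool × Nat) : List Bool × Bool :=
  let fill := !r.1 && !acc.2 && decide ((r.2 : Int) ≤ gf)
  (acc.1 ++ List.replicate r.2 (r.1 || fill), false)

def gap_fill_py_alt (flags : List Bool) (gap_fill : Int) : List Bool :=
  if gap_fill ≤ 0 ∨ flags = [] then flags
  else
    let runs := rleB flags
    let acc := (PySem.List.slice runs none (some (-1))).foldl (decodeStep gap_fill) ([], true)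
    (PySem.List.slice runs (some (-1)) none).foldl
      (fun out (r : Bool × Nat) => out ++ List.replicate r.2 r.1) acc.1

-- ===== PRECONDITION & SPEC =====
def Spec_gap_fill_py (flags : List Bool) (gap_fill : Int) (out : List Bool) : Prop := out = gap_fill_py_alt flags gap_fill
instance (flags : List Bool) (gap_fill : Int) (out : List Bool) : Decidable (Spec_gap_fill_py flags gap_fill out) := by unfold Spec_gap_fill_py; infer_instance

-- ===== CLAIM (what is proved, stated in full; the proofs are below) =====
def Claim_equal_gap_fill_py : Prop := ∀ (flags : List Bool) (gap_fill : Int), Dom_gap_fill_py flags gap_fill → Spec_gap_fill_py flags gap_fill (gap_fill_py flags gap_fill)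

-- ===== LEMMAS AND PROOFS =====

-- reference function: process a list whose (conceptual) left neighbour is True:
-- peel the leading True run, then the following False run (filled iff something follows
-- and it is short enough), recurse
theorem dropWhile2_lt (l : List Bool) (h : l ≠ []) :
    ((l.dropWhile (· == true)).dropWhile (· == false)).length < l.length := by
  cases l with
  | nil => simp at h
  | cons b l' =>
    cases b
    · have e1 : List.dropWhile (· == true) (false :: l') = false :: l' := by
        simp [List.dropWhile_cons]
      have e2 : List.dropWhile (· == false) (false :: l') = List.dropWhile (· == false) l' := by
        simp [List.dropWhile_cons]
      rw [e1, e2]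
      have := List.length_dropWhile_le (· == false) l'
      simp only [List.length_cons]
      omega
    · have e1 : List.dropWhile (· == true) (true :: l') = List.dropWhile (· == true) l' := by
        simp [List.dropWhile_cons]
      rw [e1]
      have h1 := List.length_dropWhile_le (· == true) l'
      have h2 := List.length_dropWhile_le (· == false) (List.dropWhile (· == true) l')
      simp only [List.length_cons]
      omega

def refH (gf : Int) (l : List Bool) : List Bool :=
  if hl : l = [] then []
  else
    List.replicate (l.takeWhile (· == true)).length true ++
      List.replicate ((l.dropWhile (· == true)).takeWhile (· == false)).length
        (decide ((l.dropWhile (· == true)).dropWhile (· == false) ≠ []) &&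
         decide ((((l.dropWhile (· == true)).takeWhile (· == false)).length : Int) ≤ gf)) ++
      refH gf ((l.dropWhile (· == true)).dropWhile (· == false))
termination_by l.length
decreasing_by exact dropWhile2_lt l hl

-- drop / take via getD (all indices guarded in range)
theorem drop_cons_getD (c : List Bool) (i : Nat) (h : i < c.length) :
    c.drop i = c.getD i false :: c.drop (i + 1) := by
  rw [List.drop_eq_getElem_cons h, List.getD_eq_getElem c false h]

theorem take_succ_getD (c : List Bool) (i : Nat) (h : i < c.length) :
    c.take (i + 1) = c.take i ++ [c.getD i false] := by
  have hlen : (c.take i).length = i := by rw [List.length_take]; omega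
  conv_lhs => rw [← List.take_append_drop i c]
  rw [List.take_append, hlen]
  have h3 : (c.take i).take (i + 1) = c.take i := List.take_of_length_le (by omega)
  rw [h3, drop_cons_getD c i h]
  simp

theorem refH_nil (gf : Int) : refH gf [] = [] := by rw [refH]; simp

-- takeWhile/dropWhile helpers for peeling runs
theorem tw_head (b : Bool) (l : List Bool) (h : l.head? ≠ some b) :
    l.takeWhile (· == b) = [] := by
  cases l with
  | nil => rfl
  | cons x l' =>
    have hx : (x == b) = false := by
      simp only [List.head?_cons, ne_eq, Option.some.injEq] at h
      simpa using h
    simp [List.takeWhile_cons, hx]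

theorem dw_head (b : Bool) (l : List Bool) (h : l.head? ≠ some b) :
    l.dropWhile (· == b) = l := by
  cases l with
  | nil => rfl
  | cons x l' =>
    have hx : (x == b) = false := by
      simp only [List.head?_cons, ne_eq, Option.some.injEq] at h
      simpa using h
    simp [List.dropWhile_cons, hx]

theorem tw_rep (b : Bool) (f : Nat) (l : List Bool) :
    (List.replicate f b ++ l).takeWhile (· == b) =
      List.replicate f b ++ l.takeWhile (· == b) := by
  induction f with
  | zero => simp
  | succ f ih => simp [List.replicate_succ, List.takeWhile_cons, ih]

theorem dw_rep (b : Bool) (f : Nat) (l : List Bool) :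
    (List.replicate f b ++ l).dropWhile (· == b) = l.dropWhile (· == b) := by
  induction f with
  | zero => simp
  | succ f ih => simp [List.replicate_succ, List.dropWhile_cons, ih]

theorem refH_cons_true (gf : Int) (l : List Bool) :
    refH gf (true :: l) = true :: refH gf l := by
  by_cases hl : l = []
  · subst hl
    rw [refH, dif_neg (by simp)]
    simp [List.takeWhile, List.dropWhile, refH_nil]
  · conv_lhs => rw [refH]
    conv_rhs => rw [refH]
    rw [dif_neg (by simp), dif_neg hl]
    have h1 : (true :: l).takeWhile (· == true) = true :: l.takeWhile (· == true) := by
      rw [List.takeWhile_cons]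
      simp
    have h2 : (true :: l).dropWhile (· == true) = l.dropWhile (· == true) := by
      rw [List.dropWhile_cons]
      simp
    rw [h1, h2]
    simp [List.replicate_succ]

-- peel a leading True run
theorem refH_rep_true (gf : Int) (t : Nat) (l : List Bool) :
    refH gf (List.replicate t true ++ l) = List.replicate t true ++ refH gf l := by
  induction t with
  | zero => simp
  | succ t ih => simpa [List.replicate_succ, refH_cons_true] using ih

-- peel a leading False run when the left neighbour is True and what follows starts with True
theorem refH_rep_false (gf : Int) (f : Nat) (l : List Bool) (hl : l.head? ≠ some false) :
    refH gf (List.replicate f false ++ l) =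
      List.replicate f (decide (l ≠ []) && decide ((f : Int) ≤ gf)) ++ refH gf l := by
  cases f with
  | zero => simp
  | succ m =>
    rw [refH]
    rw [dif_neg (by simp [List.replicate_succ])]
    have h1 : (List.replicate (m + 1) false ++ l).takeWhile (· == true) = [] := by
      simp [List.replicate_succ, List.takeWhile_cons]
    have h2 : (List.replicate (m + 1) false ++ l).dropWhile (· == true) =
        List.replicate (m + 1) false ++ l := by
      simp [List.replicate_succ, List.dropWhile_cons]
    rw [h1, h2, tw_rep, dw_rep, tw_head false l hl, dw_head false l hl]
    simp

-- ----- A-side -----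

theorem scanFalse_le (c : List Bool) (j : Nat) (h : j ≤ c.length) : scanFalse c j ≤ c.length := by
  rw [scanFalse]
  split
  · split
    · exact h
    · rename_i hj _
      exact scanFalse_le c (j + 1) hj
  · exact h
termination_by c.length - j
decreasing_by omega

theorem scanFalse_true (c : List Bool) (j : Nat) (h : scanFalse c j < c.length) :
    c.getD (scanFalse c j) false = true := by
  rw [scanFalse] at h ⊢
  by_cases hj : j < c.length
  · rw [if_pos hj] at h ⊢
    by_cases hf : c.getD j false = true
    · rwa [if_pos hf]
    · rw [if_neg hf] at h ⊢
      exact scanFalse_true c (j + 1) h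
  · rw [if_neg hj] at h
    omega
termination_by c.length - j
decreasing_by omega

theorem drop_scan (c : List Bool) (i : Nat) (hi : i ≤ c.length) :
    c.drop i = List.replicate (scanFalse c i - i) false ++ c.drop (scanFalse c i) := by
  rw [scanFalse]
  by_cases hlt : i < c.length
  · rw [if_pos hlt]
    by_cases hf : c.getD i false = true
    · rw [if_pos hf]; simp
    · rw [if_neg hf]
      have ih := drop_scan c (i + 1) (by omega)
      have hge := scanFalse_ge c (i + 1)
      have hf' : c.getD i false = false := by simpa using hf
      rw [drop_cons_getD c i hlt, hf', ih]
      have harep : List.replicate (scanFalse c (i + 1) - i) false =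
          false :: List.replicate (scanFalse c (i + 1) - (i + 1)) false := by
        have : scanFalse c (i + 1) - i = (scanFalse c (i + 1) - (i + 1)) + 1 := by omega
        rw [this, List.replicate_succ]
      rw [harep]
      simp
  · rw [if_neg hlt]
    simp
termination_by c.length - i
decreasing_by omega

theorem foldl_set_range' (g : Nat) :
    ∀ (i : Nat) (c : List Bool), i + g ≤ c.length →
    (List.range' i g).foldl (fun c t => c.set t true) c =
      c.take i ++ List.replicate g true ++ c.drop (i + g) := by
  induction g with
  | zero => intro i c h; simp
  | succ g ih =>
    intro i c h
    rw [List.range'_succ]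
    have hi : i < c.length := by omega
    have hstep : (List.range' (i + 1) g).foldl (fun c t => c.set t true) (c.set i true) =
        (c.set i true).take (i + 1) ++ List.replicate g true ++ (c.set i true).drop (i + 1 + g) := by
      apply ih
      simp
      omega
    simp only [List.foldl_cons]
    rw [hstep, List.drop_set_of_lt (by omega)]
    have htake : (c.set i true).take (i + 1) = c.take i ++ [true] := by
      rw [List.set_eq_take_append_cons_drop, if_pos hi]
      rw [List.take_append]
      have : (c.take i).length = i := by simp; omega
      rw [this]
      simp [List.take_take]
    rw [htake]
    have : i + 1 + g = i + (g + 1) := by omega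
    rw [this, List.replicate_succ]
    simp

theorem fillTrue_eq (c : List Bool) (i j : Nat) (hij : i ≤ j) (hj : j ≤ c.length) :
    fillTrue c i j = c.take i ++ List.replicate (j - i) true ++ c.drop j := by
  unfold fillTrue
  have h1 := foldl_set_range' (j - i) i c (by omega)
  have h2 : i + (j - i) = j := by omega
  rw [h1, h2]

theorem loopA_invariant (gf : Int) (N : Nat) :
    ∀ (c : List Bool) (i : Nat), c.length - i ≤ N → i ≤ c.length → 0 < i →
    c.getD (i - 1) false = true →
    loopA gf c i = c.take i ++ refH gf (c.drop i) := by
  induction N with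
  | zero =>
    intro c i hN hile hpos hprev
    have hieq : i = c.length := by omega
    rw [loopA, dif_neg (by omega), hieq]
    simp [refH_nil]
  | succ N ih =>
    intro c i hN hile hpos hprev
    rcases Nat.eq_or_lt_of_le hile with heq | hilt
    · rw [loopA, dif_neg (by omega), heq]
      simp [refH_nil]
    · rw [loopA, dif_pos hilt]
      by_cases hfi : c.getD i false = true
      · rw [dif_pos hfi]
        rw [ih c (i + 1) (by omega) (by omega) (by omega) (by simpa using hfi)]
        rw [drop_cons_getD c i hilt, hfi, refH_cons_true]
        have htake : c.take (i + 1) = c.take i ++ [true] := by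
          rw [take_succ_getD c i hilt, hfi]
        rw [htake]
        simp
      · rw [dif_neg hfi]
        have hfi' : c.getD i false = false := by simpa using hfi
        have hij : i < scanFalse c i := scanFalse_gt c i hilt hfi'
        set j := scanFalse c i with hjdef
        have hjle : j ≤ c.length := scanFalse_le c i (by omega)
        have hdropi : c.drop i = List.replicate (j - i) false ++ c.drop j :=
          drop_scan c i (by omega)
        by_cases hjlt : j < c.length
        · have hcj : c.getD j false = true := scanFalse_true c i hjlt
          have hdropj : c.drop j = true :: c.drop (j + 1) := by
            rw [drop_cons_getD c j hjlt, hcj]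
          by_cases hgap : ((j : Int) - (i : Int) ≤ gf)
          · rw [if_pos ⟨hpos, hjlt, hprev, hcj, hgap⟩]
            have hfe : fillTrue c i j = c.take i ++ List.replicate (j - i) true ++ c.drop j :=
              fillTrue_eq c i j (by omega) hjle
            have hflen : (fillTrue c i j).length = c.length := fillTrue_length c i j
            have hprev' : (fillTrue c i j).getD (j - 1) false = true := by
              rw [hfe, List.append_assoc]
              rw [List.getD_append_right _ _ _ _ (by simp; omega)]
              have hti : (c.take i).length = i := by simp; omega
              rw [hti]
              rw [List.getD_append _ _ _ _ (by simp; omega)]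
              have hlt' : j - 1 - i < (List.replicate (j - i) true).length := by simp; omega
              rw [List.getD_eq_getElem _ _ hlt']
              simp
            rw [ih (fillTrue c i j) j (by omega) (by omega) (by omega) hprev']
            have hdropj' : (fillTrue c i j).drop j = c.drop j := by
              rw [hfe]
              exact List.drop_left' (by simp; omega)
            have htakej : (fillTrue c i j).take j = c.take i ++ List.replicate (j - i) true := by
              rw [hfe]
              exact List.take_left' (by simp; omega)
            rw [hdropj', htakej, hdropi,
              refH_rep_false gf (j - i) (c.drop j) (by rw [hdropj]; simp)]
            have hd1 : (c.drop j ≠ []) := by rw [hdropj]; simp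
            have hd2 : (((j - i : Nat) : Int) ≤ gf) := by push_cast; omega
            simp [hd1, hd2]
          · rw [if_neg (by intro hcond; exact hgap hcond.2.2.2.2)]
            rw [loopA, dif_pos hjlt, dif_pos hcj]
            rw [ih c (j + 1) (by omega) (by omega) (by omega) (by simpa using hcj)]
            rw [hdropi, refH_rep_false gf (j - i) (c.drop j) (by rw [hdropj]; simp)]
            rw [hdropj, refH_cons_true]
            have hd1 : (true :: c.drop (j + 1) ≠ []) := by simp
            have hd2 : ¬ (((j - i : Nat) : Int) ≤ gf) := by push_cast; omega
            have htakej1 : c.take (j + 1) = c.take i ++ (List.replicate (j - i) false ++ [true]) := by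
              have h1 : c.take (j + 1) = c.take i ++ (c.drop i).take (j + 1 - i) := by
                have : j + 1 = i + (j + 1 - i) := by omega
                rw [this, List.take_add]
                congr 2
                omega
              rw [h1, hdropi, List.take_append]
              have h2 : (List.replicate (j - i) false).take (j + 1 - i) =
                  List.replicate (j - i) false := by
                apply List.take_of_length_le
                simp; omega
              have h3 : j + 1 - i - (List.replicate (j - i) false).length = 1 := by
                simp; omega
              rw [h2, h3, hdropj]
              simp
            rw [htakej1]
            simp [hd1, hd2]
        · rw [if_neg (by intro hcond; exact hjlt hcond.2.1)]
          rw [loopA, dif_neg (by omega)]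
          have hdj : c.drop j = [] := by
            apply List.drop_eq_nil_of_le
            omega
          conv_rhs => rw [hdropi, hdj]
          rw [refH_rep_false gf (j - i) [] (by simp), refH_nil]
          conv_lhs => rw [← List.take_append_drop i c, hdropi, hdj]
          simp

theorem loopA_zero (gf : Int) (c : List Bool) :
    loopA gf c 0 = c.takeWhile (· == false) ++ refH gf (c.dropWhile (· == false)) := by
  by_cases hnil : c.length = 0
  · have : c = [] := List.eq_nil_of_length_eq_zero hnil
    subst this
    rw [loopA]
    simp [refH_nil]
  · rw [loopA, dif_pos (by omega)]
    by_cases hf0 : c.getD 0 false = true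
    · rw [dif_pos hf0]
      have hcc : c = true :: c.drop 1 := by
        have h := drop_cons_getD c 0 (by omega)
        rw [hf0] at h
        simpa using h
      have hhead : c.head? = some true := by rw [hcc]; rfl
      rw [loopA_invariant gf c.length c 1 (by omega) (by omega) (by omega) (by simpa using hf0)]
      rw [tw_head false c (by rw [hhead]; simp), dw_head false c (by rw [hhead]; simp)]
      conv_rhs => rw [hcc, refH_cons_true]
      have htake : c.take 1 = [true] := by
        conv_lhs => rw [hcc]
        simp
      rw [htake]
      simp
    · rw [dif_neg hf0]
      have hf0' : c.getD 0 false = false := by simpa using hf0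
      have h0j : 0 < scanFalse c 0 := scanFalse_gt c 0 (by omega) hf0'
      set j := scanFalse c 0 with hjdef
      have hjle : j ≤ c.length := scanFalse_le c 0 (by omega)
      have hcfull : c = List.replicate j false ++ c.drop j := by
        have := drop_scan c 0 (by omega)
        simpa using this
      rw [if_neg (by intro hcond; omega)]
      by_cases hjlt : j < c.length
      · have hcj : c.getD j false = true := scanFalse_true c 0 hjlt
        have hdropj : c.drop j = true :: c.drop (j + 1) := by
          rw [drop_cons_getD c j hjlt, hcj]
        have hdhead : (c.drop j).head? ≠ some false := by rw [hdropj]; simp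
        rw [loopA, dif_pos hjlt, dif_pos hcj]
        rw [loopA_invariant gf c.length c (j + 1) (by omega) (by omega) (by omega)
          (by simpa using hcj)]
        have htw : c.takeWhile (· == false) = List.replicate j false := by
          conv_lhs => rw [hcfull]
          rw [tw_rep, tw_head false _ hdhead]
          simp
        have hdw : c.dropWhile (· == false) = c.drop j := by
          conv_lhs => rw [hcfull]
          rw [dw_rep, dw_head false _ hdhead]
        rw [htw, hdw, hdropj, refH_cons_true]
        have htakej1 : c.take (j + 1) = List.replicate j false ++ [true] := by
          conv_lhs => rw [hcfull]
          rw [List.take_append]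
          have h2 : (List.replicate j false).take (j + 1) = List.replicate j false := by
            apply List.take_of_length_le
            simp
          have h3 : j + 1 - (List.replicate j false).length = 1 := by simp
          rw [h2, h3, hdropj]
          simp
        rw [htakej1]
        simp
      · have hdj : c.drop j = [] := by
          apply List.drop_eq_nil_of_le
          omega
        rw [loopA, dif_neg (by omega)]
        rw [hdj, List.append_nil] at hcfull
        have htw0 : (List.replicate j false).takeWhile (· == false) = List.replicate j false := by
          have h := tw_rep false j ([] : List Bool)
          simpa using h
        have hdw0 : (List.replicate j false).dropWhile (· == false) = [] := by
          have h := dw_rep false j ([] : List Bool)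
          simpa using h
        have htw : c.takeWhile (· == false) = List.replicate j false := by
          conv_lhs => rw [hcfull]
          exact htw0
        have hdw : c.dropWhile (· == false) = [] := by
          conv_lhs => rw [hcfull]
          exact hdw0
        rw [htw, hdw, refH_nil, List.append_nil]
        exact hcfull

-- ----- B-side -----

-- decode the full runs list recursively: last run is emitted verbatim
def dcd (gf : Int) : List (Bool × Nat) → Bool → List Bool
  | [], _ => []
  | (v, n) :: rs, first =>
    if rs = [] then List.replicate n v
    else List.replicate n (v || (!v && !first && decide ((n : Int) ≤ gf))) ++ dcd gf rs false

-- the `for v, n in runs[:-1]` fold with no last-run special case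
def dcdL (gf : Int) : List (Bool × Nat) → Bool → List Bool
  | [], _ => []
  | (v, n) :: rs, first =>
    List.replicate n (v || (!v && !first && decide ((n : Int) ≤ gf))) ++ dcdL gf rs false

theorem foldl_decodeStep (gf : Int) (rs : List (Bool × Nat)) :
    ∀ (out : List Bool) (first : Bool),
    (rs.foldl (decodeStep gf) (out, first)).1 = out ++ dcdL gf rs first := by
  induction rs with
  | nil => intro out first; simp [dcdL]
  | cons r rs ih =>
    intro out first
    obtain ⟨v, n⟩ := r
    simp only [List.foldl_cons]
    rw [show decodeStep gf (out, first) (v, n) =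
      (out ++ List.replicate n (v || (!v && !first && decide ((n : Int) ≤ gf))), false) from rfl]
    rw [ih]
    simp [dcdL]

theorem dcd_decomp (gf : Int) (rs : List (Bool × Nat)) (hrs : rs ≠ []) (first : Bool) :
    dcd gf rs first =
      dcdL gf rs.dropLast first ++
        (rs.drop (rs.length - 1)).flatMap (fun r : Bool × Nat => List.replicate r.2 r.1) := by
  induction rs generalizing first with
  | nil => exact absurd rfl hrs
  | cons r rs ih =>
    obtain ⟨v, n⟩ := r
    by_cases h : rs = []
    · subst h
      simp [dcd, dcdL]
    · rw [show dcd gf ((v, n) :: rs) first =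
        List.replicate n (v || (!v && !first && decide ((n : Int) ≤ gf))) ++ dcd gf rs false by
          rw [dcd]; rw [if_neg h]]
      rw [List.dropLast_cons_of_ne_nil h]
      have hlen : ((v, n) :: rs).length - 1 = (rs.length - 1) + 1 := by
        have : rs.length ≥ 1 := List.length_pos_of_ne_nil h
        simp
        omega
      rw [hlen, List.drop_succ_cons]
      rw [show dcdL gf ((v, n) :: rs.dropLast) first =
        List.replicate n (v || (!v && !first && decide ((n : Int) ≤ gf))) ++ dcdL gf rs.dropLast false
        from rfl]
      rw [ih h false]
      simp

theorem rle_shift (b : Bool) (n : Nat) (t : List (Bool × Nat)) :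
    ∀ (bs : List Bool), bs.foldl rleStep ((b, n) :: t) = bs.foldl rleStep [(b, n)] ++ t := by
  intro bs
  induction bs generalizing b n t with
  | nil => simp
  | cons x bs ih =>
    simp only [List.foldl_cons]
    by_cases hbx : (b == x) = true
    · rw [show rleStep ((b, n) :: t) x = (x, n + 1) :: t by simp [rleStep, hbx],
        show rleStep [(b, n)] x = [(x, n + 1)] by simp [rleStep, hbx]]
      exact ih x (n + 1) t
    · rw [show rleStep ((b, n) :: t) x = (x, 1) :: (b, n) :: t by simp [rleStep, hbx],
        show rleStep [(b, n)] x = [(x, 1), (b, n)] by simp [rleStep, hbx]]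
      rw [ih x 1 ((b, n) :: t), ih x 1 [(b, n)]]
      simp

theorem rle_absorb (b : Bool) (m : Nat) :
    ∀ (n : Nat) (bs : List Bool),
    (List.replicate m b ++ bs).foldl rleStep [(b, n)] = bs.foldl rleStep [(b, n + m)] := by
  induction m with
  | zero => intro n bs; simp
  | succ m ih =>
    intro n bs
    rw [List.replicate_succ]
    simp only [List.cons_append, List.foldl_cons]
    rw [show rleStep [(b, n)] b = [(b, n + 1)] by simp [rleStep]]
    rw [ih (n + 1) bs]
    have : n + 1 + m = n + (m + 1) := by omega
    rw [this]

theorem rleB_run (b : Bool) (n : Nat) (rest : List Bool) (hn : 0 < n)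
    (hr : rest.head? ≠ some b) :
    rleB (List.replicate n b ++ rest) = (b, n) :: rleB rest := by
  obtain ⟨m, rfl⟩ : ∃ m, n = m + 1 := ⟨n - 1, by omega⟩
  unfold rleB
  rw [List.replicate_succ]
  simp only [List.cons_append, List.foldl_cons]
  rw [show rleStep [] b = [(b, 1)] from rfl]
  rw [rle_absorb b m 1 rest]
  cases rest with
  | nil => simp [Nat.add_comm]
  | cons x rest' =>
    have hbx : (b == x) = false := by
      simp only [List.head?_cons, ne_eq, Option.some.injEq] at hr
      cases x <;> cases b <;> simp_all
    simp only [List.foldl_cons]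
    rw [show rleStep [(b, 1 + m)] x = (x, 1) :: [(b, 1 + m)] by simp [rleStep, hbx]]
    rw [rle_shift x 1 [(b, 1 + m)] rest']
    rw [show rleStep [] x = [(x, 1)] from rfl]
    simp [Nat.add_comm]

theorem foldl_rleStep_ne_nil :
    ∀ (bs : List Bool) (acc : List (Bool × Nat)), acc ≠ [] → bs.foldl rleStep acc ≠ [] := by
  intro bs
  induction bs with
  | nil => intro acc h; simpa using h
  | cons x bs ih =>
    intro acc h
    simp only [List.foldl_cons]
    apply ih
    cases acc with
    | nil => simp [rleStep]
    | cons r t =>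
      obtain ⟨v, n⟩ := r
      by_cases hvx : (v == x) = true <;> simp [rleStep, hvx]

theorem rleB_nil_iff (l : List Bool) : rleB l = [] ↔ l = [] := by
  cases l with
  | nil => simp [rleB]
  | cons x l' =>
    unfold rleB
    simp only [List.foldl_cons]
    rw [show rleStep [] x = [(x, 1)] from rfl]
    have h := foldl_rleStep_ne_nil l' [(x, 1)] (by simp)
    simp [h]

theorem dcd_eq_ref (gf : Int) : ∀ (L : Nat) (l : List Bool), l.length ≤ L →
    dcd gf (rleB l) false = refH gf l ∧
    dcd gf (rleB l) true = l.takeWhile (· == false) ++ refH gf (l.dropWhile (· == false)) := by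
  intro L
  induction L with
  | zero =>
    intro l hl
    have hnil : l = [] := by cases l <;> simp_all
    subst hnil
    simp [rleB, dcd, refH_nil]
  | succ L ih =>
    intro l hl
    cases l with
    | nil => simp [rleB, dcd, refH_nil]
    | cons b l0 =>
      set R := (b :: l0).dropWhile (· == b) with hR
      set r := ((b :: l0).takeWhile (· == b)).length with hr
      have hdecomp : b :: l0 = List.replicate r b ++ R := by
        conv_lhs => rw [← List.takeWhile_append_dropWhile (p := (· == b)) (l := b :: l0)]
        congr 1
        rw [List.eq_replicate_iff]
        exact ⟨rfl, fun x hx => by have := List.mem_takeWhile_imp hx; simpa using this⟩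
      have hr1 : 0 < r := by
        rw [hr]
        simp [List.takeWhile_cons]
      have hRhead : R.head? ≠ some b := by
        have h := List.head?_dropWhile_not (· == b) (b :: l0)
        rw [← hR] at h
        intro hc
        rw [hc] at h
        simp at h
      have hRlen : R.length ≤ L := by
        have h := congrArg List.length hdecomp
        simp only [List.length_append, List.length_replicate] at h
        simp only [List.length_cons] at h hl
        omega
      have hrle : rleB (b :: l0) = (b, r) :: rleB R := by
        rw [hdecomp]
        exact rleB_run b r R hr1 hRhead
      have ihR := ih R hRlen
      cases b with
      | true =>
        have hrefH : refH gf (true :: l0) = List.replicate r true ++ refH gf R := by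
          conv_lhs => rw [hdecomp]
          exact refH_rep_true gf r R
        have htw : (true :: l0).takeWhile (· == false) = [] := by
          rw [List.takeWhile_cons]
          simp
        have hdw : (true :: l0).dropWhile (· == false) = true :: l0 := by
          rw [List.dropWhile_cons]
          simp
        have hmain : ∀ first : Bool,
            dcd gf (rleB (true :: l0)) first = List.replicate r true ++ refH gf R := by
          intro first
          rw [hrle]
          by_cases hR0 : R = []
          · rw [show dcd gf ((true, r) :: rleB R) first = List.replicate r true by
              rw [hR0]; simp [rleB, dcd]]
            rw [hR0, refH_nil, List.append_nil]
          · have hrne : rleB R ≠ [] := by rwa [ne_eq, rleB_nil_iff]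
            rw [show dcd gf ((true, r) :: rleB R) first =
                List.replicate r true ++ dcd gf (rleB R) false by
              rw [dcd, if_neg hrne]; simp]
            rw [ihR.1]
        exact ⟨by rw [hmain false, hrefH], by rw [hmain true, htw, hdw, List.nil_append, hrefH]⟩
      | false =>
        have htw : (false :: l0).takeWhile (· == false) = List.replicate r false := by
          conv_lhs => rw [hdecomp]
          rw [tw_rep, tw_head false R hRhead, List.append_nil]
        have hdw : (false :: l0).dropWhile (· == false) = R := by
          conv_lhs => rw [hdecomp]
          rw [dw_rep, dw_head false R hRhead]
        have hrefH : refH gf (false :: l0) =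
            List.replicate r (decide (R ≠ []) && decide ((r : Int) ≤ gf)) ++ refH gf R := by
          conv_lhs => rw [hdecomp]
          exact refH_rep_false gf r R hRhead
        constructor
        · rw [hrle]
          by_cases hR0 : R = []
          · rw [show dcd gf ((false, r) :: rleB R) false = List.replicate r false by
              rw [hR0]; simp [rleB, dcd]]
            rw [hrefH, hR0, refH_nil, List.append_nil]
            simp
          · have hrne : rleB R ≠ [] := by rwa [ne_eq, rleB_nil_iff]
            rw [show dcd gf ((false, r) :: rleB R) false =
                List.replicate r (decide ((r : Int) ≤ gf)) ++ dcd gf (rleB R) false by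
              rw [dcd, if_neg hrne]; simp]
            rw [ihR.1, hrefH]
            simp [hR0]
        · rw [hrle, htw, hdw]
          by_cases hR0 : R = []
          · rw [show dcd gf ((false, r) :: rleB R) true = List.replicate r false by
              rw [hR0]; simp [rleB, dcd]]
            rw [hR0, refH_nil, List.append_nil]
          · have hrne : rleB R ≠ [] := by rwa [ne_eq, rleB_nil_iff]
            rw [show dcd gf ((false, r) :: rleB R) true =
                List.replicate r false ++ dcd gf (rleB R) false by
              rw [dcd, if_neg hrne]; simp]
            rw [ihR.1]

theorem dcd_eq_refG (gf : Int) (l : List Bool) :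
    dcd gf (rleB l) true = l.takeWhile (· == false) ++ refH gf (l.dropWhile (· == false)) :=
  (dcd_eq_ref gf l.length l le_rfl).2

-- ===== VERDICT (by name: the statement is the Claim_ definition above) =====
theorem gap_fill_py_spec : Claim_equal_gap_fill_py := by
  intro flags gf _
  unfold Spec_gap_fill_py gap_fill_py gap_fill_py_alt
  split
  · rfl
  · rename_i h
    have hne : flags ≠ [] := by
      intro hnil
      exact h (Or.inr hnil)
    rw [loopA_zero, ← dcd_eq_refG gf flags]
    show dcd gf (rleB flags) true =
      (PySem.List.slice (rleB flags) (some (-1)) none).foldl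
        (fun out (r : Bool × Nat) => out ++ List.replicate r.2 r.1)
        ((PySem.List.slice (rleB flags) none (some (-1))).foldl (decodeStep gf) ([], true)).1
    rw [PySem.List.slice_to_neg_one, PySem.List.slice_from_neg_one, foldl_decodeStep,
      List.nil_append, PySem.List.foldl_append_eq_flatMap]
    exact dcd_decomp gf (rleB flags) (by rwa [ne_eq, rleB_nil_iff]) true
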